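-- pv_equiv track=rewrite | github.com/marcantoineblais/text-encryption | main.py | text_decryption
-- ===== SOURCE A (Python) =====
-- def characters_list_generator():
--     characters_list = [chr(i) for i in range(32, 127)]
--     for i in range(192, 382):
--         characters_list.append(chr(i))
--     characters_list.append("’")
--     return characters_list
--
-- def text_decryption(initial_text, keyword):
--     characters_list = characters_list_generator()
--
--     keyword_value_list = []
--     for character in keyword:
--         i = 0
--         while i in range(len(characters_list)):
--             if character == characters_list[i]:
--                 keyword_value_list.append(len(characters_list) - i)
--             i += 1
--
--     initial_text_value_list = []
--     for character in initial_text: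
--         i = 0
--         while i in range(len(characters_list)):
--             if character == characters_list[i]:
--                 initial_text_value_list.append(i)
--             i += 1
--
--     encrypted_text_value_list = []
--     i = 0
--     last_value = 0
--     for value in initial_text_value_list:
--         encrypted_text_character_value = value + (keyword_value_list[i] + last_value)
--         while encrypted_text_character_value >= len(characters_list):
--             encrypted_text_character_value -= len(characters_list)
--         encrypted_text_value_list.append(encrypted_text_character_value)
--         last_value = keyword_value_list[i] + last_value
--         while last_value >= len(characters_list):
--             last_value -= len(characters_list)
--         i += 1
--         if i == len(keyword_value_list):
--             i = 0
--
--     encrypted_text_character_list = []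
--     for value in encrypted_text_value_list:
--         for i in range(len(characters_list)):
--             if i == value:
--                 encrypted_text_character_list.append(characters_list[i])
--                 break
--     encrypted_text = "".join(encrypted_text_character_list)
--     return encrypted_text
-- ===== SOURCE B (Python) =====
-- def text_decryption(initial_text, keyword):
--     charset = [chr(i) for i in range(32, 127)] + [chr(i) for i in range(192, 382)] + ["\u2019"]
--     n = len(charset)
--     keyword_values = [n - charset.index(c) for c in keyword if c in charset]
--     prefix = [0]
--     for v in keyword_values:
--         prefix.append(prefix[-1] + v)
--     m = len(keyword_values)
--     total = prefix[m]
--     text_indices = [charset.index(c) for c in initial_text if c in charset]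
--     # the running shift after t+1 keyword steps has the closed form
--     # (t // m) * total + prefix[t % m + 1]; no sequential accumulator is carried
--     return "".join(charset[(j + (t // m) * total + prefix[t % m + 1]) % n]
--                    for t, j in enumerate(text_indices))
-- ===== Notes on version B (the rewrite author's own statement) =====
-- stated objective: faster
-- what changed: A carries a sequential running accumulator (last_value) with repeated-subtraction reduction and rescans the full charset for every character; B replaces the recurrence by a closed-form shift computed from a keyword prefix-sum table, shift(t) = (t//m)*total + prefix[t%m+1] mod n, so each output character is computed independently of any carried state and each lookup is a single index scan instead of several full 286-element passes.
import Mathlib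
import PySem

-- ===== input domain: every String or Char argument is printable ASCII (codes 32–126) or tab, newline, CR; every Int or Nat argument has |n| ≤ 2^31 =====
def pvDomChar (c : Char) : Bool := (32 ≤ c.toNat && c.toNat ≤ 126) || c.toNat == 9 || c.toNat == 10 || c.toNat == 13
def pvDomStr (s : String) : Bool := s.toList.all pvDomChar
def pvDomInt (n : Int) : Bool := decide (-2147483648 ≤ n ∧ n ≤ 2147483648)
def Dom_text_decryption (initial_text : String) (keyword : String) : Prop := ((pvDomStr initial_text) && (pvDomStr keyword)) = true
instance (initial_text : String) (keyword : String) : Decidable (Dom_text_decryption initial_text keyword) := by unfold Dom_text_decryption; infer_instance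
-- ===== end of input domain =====

-- B replaces A's carried last_value accumulator by a closed-form shift from a keyword prefix-sum table; same return value wherever A returns.
set_option maxRecDepth 8192


-- ===== PORT A =====
-- characters_list_generator(): comprehension over range(32,127), then an append loop over range(192,382), then append '’'
def charsGenA : List Char :=
  ((PySem.List.pyRange 192 382 1).foldl (fun acc i => acc ++ [Char.ofNat i.toNat])
    ((PySem.List.pyRange 32 127 1).map (fun i => Char.ofNat i.toNat))) ++ ['’']

-- 'while v >= len(characters_list): v -= len(characters_list)'
def pyReduce (x : Int) (n : Int) : Int :=
  if _h : 0 < n ∧ n ≤ x then pyReduce (x - n) n else x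
termination_by x.toNat
decreasing_by omega

-- the value-collecting loop pattern of A's first two passes:
-- 'i = 0; while i in range(len(characters_list)): if character == characters_list[i]: out.append(f(i)); i += 1'
def phase1A (x : List Char) (f : Nat → Int) : List Int :=
  x.foldl (fun acc ch =>
    (List.range charsGenA.length).foldl (fun a (i : Nat) => if ch = charsGenA[i]! then a ++ [f i] else a) acc) []

-- the body of A's third loop, state (encrypted_text_value_list, i, last_value)
def stepA (kv : List Int) (s : List Int × Int × Int) (v : Int) : List Int × Int × Int :=
  (s.1 ++ [pyReduce (v + (PySem.List.pyGetD kv s.2.1 0 + s.2.2)) (charsGenA.length : Int)],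
   if s.2.1 + 1 = PySem.List.len kv then 0 else s.2.1 + 1,
   pyReduce (PySem.List.pyGetD kv s.2.1 0 + s.2.2) (charsGenA.length : Int))

-- A's final loop: 'for i in range(len(characters_list)): if i == value: append(characters_list[i]); break' = find?
def phase4A (l : List Int) : List Char :=
  l.foldl (fun acc v =>
    match (List.range charsGenA.length).find? (fun (i : Nat) => (i : Int) == v) with
    | some i => acc ++ [charsGenA[i]!]
    | none => acc) []

def text_decryption (initial_text : String) (keyword : String) : String :=
  let kv := phase1A keyword.toList (fun i => (charsGenA.length : Int) - (i : Int))
  let tv := phase1A initial_text.toList (fun i => (i : Int))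
  let st := tv.foldl (stepA kv) ([], 0, 0)
  String.ofList (phase4A st.1)

-- ===== PORT B =====
def charsB : List Char :=
  (PySem.List.pyRange 32 127 1).map (fun i => Char.ofNat i.toNat)
    ++ (PySem.List.pyRange 192 382 1).map (fun i => Char.ofNat i.toNat) ++ ['’']

-- Source B's paired "c in charset" test and "charset.index(c)" are ported jointly as
-- PySem.List.index?, which returns none exactly when c is not in the list.
def kvB (k : String) : List Int :=
  k.toList.filterMap (fun c => (PySem.List.index? charsB c).map (fun (j : Nat) => PySem.List.len charsB - (j : Int)))

-- 'prefix = [0]; for v in keyword_values: prefix.append(prefix[-1] + v)'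
def prefB (kv : List Int) : List Int :=
  kv.foldl (fun p v => p ++ [PySem.List.pyGetD p (-1) 0 + v]) [0]

def text_decryption_alt (initial_text : String) (keyword : String) : String :=
  let n : Int := PySem.List.len charsB
  let kv := kvB keyword
  let pref := prefB kv
  let m : Int := PySem.List.len kv
  let total : Int := PySem.List.pyGetD pref m 0
  let textIdx : List Int :=
    initial_text.toList.filterMap (fun c => (PySem.List.index? charsB c).map (fun (j : Nat) => (j : Int)))
  String.ofList ((PySem.List.enumerate textIdx).map (fun tj =>
    PySem.List.pyGetD charsB
      (PySem.Int.mod (tj.2 + PySem.Int.floordiv tj.1 m * total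
        + PySem.List.pyGetD pref (PySem.Int.mod tj.1 m + 1) 0) n) ' '))

-- ===== PRECONDITION & SPEC =====
-- Pre_ excludes exactly the inputs where A raises IndexError (and Source B ZeroDivisionError):
-- no keyword character lies in the 286-character charset while the text contains a charset character.
def Pre_text_decryption (initial_text : String) (keyword : String) : Prop :=
  (keyword.toList.any (fun c => charsB.contains c)
    || initial_text.toList.all (fun c => !charsB.contains c)) = true
instance (initial_text : String) (keyword : String) : Decidable (Pre_text_decryption initial_text keyword) := by unfold Pre_text_decryption; infer_instance

def pvWitness_text_decryption : String × String := ("Hello, world!", "key")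

def Spec_text_decryption (initial_text : String) (keyword : String) (out : String) : Prop := out = text_decryption_alt initial_text keyword
instance (initial_text : String) (keyword : String) (out : String) : Decidable (Spec_text_decryption initial_text keyword out) := by unfold Spec_text_decryption; infer_instance

-- ===== CLAIM (what is proved, stated in full; the proofs are below) =====
def Claim_equal_text_decryption : Prop := ∀ (initial_text : String) (keyword : String), Dom_text_decryption initial_text keyword → Pre_text_decryption initial_text keyword → Spec_text_decryption initial_text keyword (text_decryption initial_text keyword)

-- ===== LEMMAS AND PROOFS =====

-- simplified (286-literal) forms used throughout the proofs
def kvL (k : String) : List Int :=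
  k.toList.filterMap (fun c => (PySem.List.index? charsGenA c).map (fun (j : Nat) => (286 : Int) - (j : Int)))

def tvOf (u : List Char) : List Int :=
  u.filterMap (fun c => (PySem.List.index? charsGenA c).map (fun (j : Nat) => (j : Int)))

def stepA2 (kv : List Int) (s : List Int × Int × Int) (v : Int) : List Int × Int × Int :=
  (s.1 ++ [pyReduce (v + (PySem.List.pyGetD kv s.2.1 0 + s.2.2)) 286],
   if s.2.1 + 1 = (kv.length : Int) then 0 else s.2.1 + 1,
   pyReduce (PySem.List.pyGetD kv s.2.1 0 + s.2.2) 286)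

-- cyclic prefix sum of the keyword values: cycSum kv q = Σ_{j<q} kv[j % m]
def cycSum (kv : List Int) : Nat → Int
  | 0 => 0
  | q + 1 => cycSum kv q + kv.getD (q % kv.length) 0

-- closed-form output values: t-th output value = (v_t + cycSum (t+1)) % 286
def closedOut (kv : List Int) : List Int → Nat → List Int
  | [], _ => []
  | v :: rest, t0 => (v + cycSum kv (t0 + 1)) % 286 :: closedOut kv rest (t0 + 1)

def g4 (v : Int) : List Char :=
  match (List.range charsGenA.length).find? (fun (i : Nat) => (i : Int) == v) with
  | some i => [charsGenA[i]!]
  | none => []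

set_option maxRecDepth 10000 in
theorem chars_eq : charsB = charsGenA := by decide

set_option maxRecDepth 10000 in
theorem chars_len : charsGenA.length = 286 := by decide

set_option maxRecDepth 10000 in
theorem chars_nodup : charsGenA.Nodup := by
  have h : (charsGenA.map Char.toNat).IsChain (· < ·) := by decide
  have hp := List.isChain_iff_pairwise.mp h
  rw [List.pairwise_map] at hp
  exact hp.imp (fun {a b} hlt => by intro e; subst e; exact lt_irrefl _ hlt)

theorem stepA_eq (kv : List Int) : stepA kv = stepA2 kv := by
  funext s v
  simp only [stepA, stepA2, PySem.List.len_eq, chars_len, Nat.cast_ofNat]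
  rfl

theorem kvB_eq (k : String) : kvB k = kvL k := by
  simp only [kvB, kvL, chars_eq, PySem.List.len_eq, chars_len, Nat.cast_ofNat]

theorem uniq_single {β : Type} (l : List β) (j : β) (hl : l.Nodup) (hj : j ∈ l) (hall : ∀ x ∈ l, x = j) : l = [j] := by
  cases l with
  | nil => cases hj
  | cons a t =>
    have ha : a = j := hall a (by simp)
    subst ha
    cases t with
    | nil => rfl
    | cons b u =>
      have hb : b = a := hall b (by simp)
      subst hb
      simp at hl

theorem flatMap_toList_filterMap {α β : Type} (l : List α) (f : α → Option β) :
    l.flatMap (fun a => (f a).toList) = l.filterMap f := by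
  induction l with
  | nil => rfl
  | cons x t ih => cases h : f x <;> simp [h, ih]

set_option maxRecDepth 40000 in
theorem scan_filter (c : Char) :
    (List.range charsGenA.length).filter (fun i => decide (c = charsGenA[i]!)) = (PySem.List.index? charsGenA c).toList := by
  cases h : PySem.List.index? charsGenA c with
  | none =>
    rw [PySem.List.index?_eq_none_iff] at h
    show _ = ([] : List Nat)
    rw [List.filter_eq_nil_iff]
    intro i hi
    have hi' : i < charsGenA.length := List.mem_range.mp hi
    rw [getElem!_pos charsGenA i hi']
    simp only [decide_eq_true_eq]
    intro he; exact h (he ▸ List.getElem_mem hi')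
  | some j =>
    rw [PySem.List.index?_eq_idxOf?] at h
    obtain ⟨hjl, hje, _⟩ := List.idxOf?_eq_some_iff.mp h
    apply uniq_single
    · exact (List.nodup_range).filter _
    · rw [List.mem_filter]
      refine ⟨List.mem_range.mpr hjl, ?_⟩
      rw [getElem!_pos charsGenA j hjl]
      simp [hje]
    · intro x hx
      rw [List.mem_filter] at hx
      obtain ⟨hxr, hxe⟩ := hx
      have hxl : x < charsGenA.length := List.mem_range.mp hxr
      rw [getElem!_pos charsGenA x hxl] at hxe
      simp only [decide_eq_true_eq] at hxe
      refine (chars_nodup.getElem_inj_iff (hi := hxl) (hj := hjl)).mp ?_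
      rw [hje, ← hxe]

set_option maxRecDepth 40000 in
theorem scan_foldl (c : Char) (f : Nat → Int) (acc : List Int) :
    (List.range charsGenA.length).foldl (fun a (i : Nat) => if c = charsGenA[i]! then a ++ [f i] else a) acc
      = acc ++ ((PySem.List.index? charsGenA c).map f).toList := by
  rw [PySem.List.foldl_append_ite, scan_filter, Option.toList_map]

theorem phase1_gen (x : List Char) (f : Nat → Int) :
    phase1A x f = x.filterMap (fun c => (PySem.List.index? charsGenA c).map f) := by
  unfold phase1A
  refine (PySem.List.foldl_congr_mem x _ (fun acc ch => acc ++ ((PySem.List.index? charsGenA ch).map f).toList) []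
    (fun acc c _ => scan_foldl c f acc)).trans ?_
  rw [PySem.List.foldl_append_eq_flatMap, List.nil_append, flatMap_toList_filterMap]

theorem phase1_kv (k : String) :
    phase1A k.toList (fun i => (charsGenA.length : Int) - (i : Int)) = kvL k := by
  rw [phase1_gen, kvL]
  simp only [chars_len, Nat.cast_ofNat]

theorem pyReduce_eq (x n : Int) (hx : 0 ≤ x) (hn : 0 < n) : pyReduce x n = x % n := by
  fun_induction pyReduce x n with
  | case1 x h ih =>
    rw [ih (by omega), Int.sub_emod_right]
  | case2 x h =>
    rw [Int.emod_eq_of_lt hx (by omega)]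

theorem find?_range (n : Nat) (v : Int) (h0 : 0 ≤ v) (h : v < n) :
    (List.range n).find? (fun (i : Nat) => (i : Int) == v) = some v.toNat := by
  induction n with
  | zero => omega
  | succ m ih =>
    rw [List.range_succ, List.find?_append]
    by_cases hv : v < m
    · rw [ih hv]; rfl
    · have hvm : v = (m : Int) := by omega
      have h1 : (List.range m).find? (fun (i : Nat) => (i : Int) == v) = none := by
        rw [List.find?_eq_none]
        intro x hx
        have := List.mem_range.mp hx
        simp only [beq_iff_eq]
        omega
      rw [h1]
      simp [hvm]

set_option maxRecDepth 40000 in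
theorem g4_eq (v : Int) (h0 : 0 ≤ v) (h : v < 286) : g4 v = [charsGenA[v.toNat]!] := by
  unfold g4
  rw [chars_len, find?_range 286 v h0 h]

set_option maxRecDepth 40000 in
theorem phase4_flatMap (l : List Int) : phase4A l = l.flatMap g4 := by
  unfold phase4A
  have hb : (fun (acc : List Char) (v : Int) =>
      match (List.range charsGenA.length).find? (fun (i : Nat) => (i : Int) == v) with
      | some i => acc ++ [charsGenA[i]!]
      | none => acc)
      = fun acc v => acc ++ g4 v := by
    funext acc v
    unfold g4
    cases hf : (List.range charsGenA.length).find? (fun (i : Nat) => (i : Int) == v) <;> simp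
  rw [hb, PySem.List.foldl_append_eq_flatMap, List.nil_append]

theorem foldlA_append (kv : List Int) (u : List Int) :
    ∀ (acc : List Int) (p : Int × Int),
      u.foldl (stepA2 kv) (acc, p)
        = (acc ++ (u.foldl (stepA2 kv) ([], p)).1, (u.foldl (stepA2 kv) ([], p)).2) := by
  induction u with
  | nil => intro acc p; simp
  | cons v rest ih =>
    intro acc p
    simp only [List.foldl_cons]
    rw [ih (stepA2 kv (acc, p) v).1 (stepA2 kv (acc, p) v).2, ih (stepA2 kv ([], p) v).1 (stepA2 kv ([], p) v).2]
    simp [stepA2]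

theorem index?_lt (c : Char) (j : Nat) (h : PySem.List.index? charsGenA c = some j) : j < 286 := by
  rw [PySem.List.index?_eq_idxOf?] at h
  obtain ⟨hjl, _, _⟩ := List.idxOf?_eq_some_iff.mp h
  rw [chars_len] at hjl
  exact hjl

theorem kv_bounds (k : String) : ∀ x ∈ kvL k, 1 ≤ x ∧ x ≤ 286 := by
  intro x hx
  rw [kvL, List.mem_filterMap] at hx
  obtain ⟨c, _, hc⟩ := hx
  rw [Option.map_eq_some_iff] at hc
  obtain ⟨j, hj, he⟩ := hc
  have := index?_lt c j hj
  omega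

theorem tv_nonneg (u : List Char) : ∀ v ∈ tvOf u, 0 ≤ v := by
  intro v hv
  rw [tvOf, List.mem_filterMap] at hv
  obtain ⟨c, _, hc⟩ := hv
  rw [Option.map_eq_some_iff] at hc
  obtain ⟨j, _, he⟩ := hc
  omega

theorem cycSum_nonneg (kv : List Int) (hkv : ∀ x ∈ kv, 1 ≤ x ∧ x ≤ 286) :
    ∀ q, 0 ≤ cycSum kv q := by
  intro q
  induction q with
  | zero => simp [cycSum]
  | succ p ih =>
    rw [cycSum]
    rcases Decidable.em (kv = []) with h | h
    · subst h; simpa [List.getD] using ih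
    · have hm : 0 < kv.length := List.length_pos_of_ne_nil h
      have hmem : kv.getD (p % kv.length) 0 ∈ kv := by
        rw [List.getD_eq_getElem kv 0 (Nat.mod_lt _ hm)]
        exact List.getElem_mem _
      have := hkv _ hmem
      omega

-- (t+1) % m as a branch on t % m
theorem succ_mod (t m : Nat) (hm : 0 < m) :
    (t + 1) % m = if t % m + 1 = m then 0 else t % m + 1 := by
  have hd := Nat.div_add_mod t m
  have ht : t % m < m := Nat.mod_lt t hm
  by_cases h : t % m + 1 = m
  · rw [if_pos h]
    have he : t + 1 = m * (t / m + 1) := by rw [Nat.mul_add, Nat.mul_one]; omega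
    rw [he, Nat.mul_mod_right]
  · rw [if_neg h]
    have he : t + 1 = m * (t / m) + (t % m + 1) := by omega
    rw [he, Nat.mul_add_mod, Nat.mod_eq_of_lt (by omega)]

theorem take_succ_sum (kv : List Int) (r : Nat) (hr : r < kv.length) :
    (kv.take (r + 1)).sum = (kv.take r).sum + kv.getD r 0 := by
  rw [List.take_add_one, List.sum_append, List.getD_eq_getElem kv 0 hr,
    List.getElem?_eq_getElem hr]
  simp

-- closed form for the cyclic sum
theorem cycSum_closed (kv : List Int) (hne : kv ≠ []) (t : Nat) :
    cycSum kv t = (t / kv.length : Nat) * kv.sum + (kv.take (t % kv.length)).sum := by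
  have hm : 0 < kv.length := List.length_pos_of_ne_nil hne
  induction t with
  | zero => simp [cycSum]
  | succ t ih =>
    have ht : t % kv.length < kv.length := Nat.mod_lt t hm
    have hd := Nat.div_add_mod t kv.length
    rw [cycSum, ih, add_assoc, ← take_succ_sum kv _ ht]
    by_cases h : t % kv.length + 1 = kv.length
    · have he : t + 1 = kv.length * (t / kv.length + 1) := by
        rw [Nat.mul_add, Nat.mul_one]; omega
      have hdiv : (t + 1) / kv.length = t / kv.length + 1 := by
        rw [he, Nat.mul_div_cancel_left _ hm]
      have hmod : (t + 1) % kv.length = 0 := by rw [he, Nat.mul_mod_right]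
      rw [hdiv, hmod, h, List.take_length, List.take_zero, List.sum_nil]
      push_cast
      ring
    · have he : t + 1 = kv.length * (t / kv.length) + (t % kv.length + 1) := by omega
      have hdiv : (t + 1) / kv.length = t / kv.length := by
        rw [he, Nat.mul_add_div hm,
          Nat.div_eq_of_lt (show t % kv.length + 1 < kv.length by omega), Nat.add_zero]
      have hmod : (t + 1) % kv.length = t % kv.length + 1 := by
        rw [he, Nat.mul_add_mod, Nat.mod_eq_of_lt (by omega)]
      rw [hdiv, hmod]

theorem cycSum_succ_closed (kv : List Int) (hne : kv ≠ []) (t : Nat) :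
    cycSum kv (t + 1) = (t / kv.length : Nat) * kv.sum + (kv.take (t % kv.length + 1)).sum := by
  have hm : 0 < kv.length := List.length_pos_of_ne_nil hne
  rw [cycSum, cycSum_closed kv hne t, add_assoc,
    ← take_succ_sum kv _ (Nat.mod_lt t hm)]

-- the prefix list built by Source B's loop is the list of take-sums
theorem prefB_eq (kv : List Int) :
    prefB kv = (List.range (kv.length + 1)).map (fun r => (kv.take r).sum) := by
  induction kv using List.reverseRecOn with
  | nil => rfl
  | append_singleton kv v ih =>
    have hstep : prefB (kv ++ [v]) = prefB kv ++ [PySem.List.pyGetD (prefB kv) (-1) 0 + v] := by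
      unfold prefB
      rw [List.foldl_append]
      rfl
    have hlast : PySem.List.pyGetD (prefB kv) (-1) 0 = kv.sum := by
      rw [ih, List.range_succ, List.map_append, List.map_cons, List.map_nil]
      rw [PySem.List.pyGetD_neg_one_append_singleton]
      rw [List.take_length]
    rw [hstep, hlast, ih]
    rw [List.length_append, List.length_singleton, List.range_succ (n := kv.length + 1),
      List.map_append]
    congr 1
    · apply List.map_congr_left
      intro r hr
      have hr' : r ≤ kv.length := by
        have := List.mem_range.mp hr
        omega
      rw [List.take_append_of_le_length hr']
    · simp [List.take_of_length_le (by simp : (kv ++ [v]).length ≤ kv.length + 1)]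

theorem prefB_getD (kv : List Int) (r : Nat) (hr : r < kv.length + 1) :
    (prefB kv).getD r 0 = (kv.take r).sum := by
  rw [prefB_eq, List.getD_eq_getElem _ 0 (by simpa using hr)]
  simp

-- A's fold computes the closed-form outputs
theorem foldA_closed (kv : List Int) (hkv : ∀ x ∈ kv, 1 ≤ x ∧ x ≤ 286) (hne : kv ≠ []) :
    ∀ (u : List Int), (∀ v ∈ u, 0 ≤ v) → ∀ (t0 : Nat),
      (u.foldl (stepA2 kv) ([], ((t0 % kv.length : Nat) : Int), (cycSum kv t0) % 286)).1
        = closedOut kv u t0 := by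
  intro u
  induction u with
  | nil => intro _ t0; rfl
  | cons v rest ih =>
    intro hu t0
    have hm : 0 < kv.length := List.length_pos_of_ne_nil hne
    have ht : t0 % kv.length < kv.length := Nat.mod_lt t0 hm
    have hv : 0 ≤ v := hu v (by simp)
    have hc0 : 0 ≤ cycSum kv t0 := cycSum_nonneg kv hkv t0
    have hkvr : kv.getD (t0 % kv.length) 0 ∈ kv := by
      rw [List.getD_eq_getElem kv 0 ht]
      exact List.getElem_mem _
    have hkb := hkv _ hkvr
    have hget : PySem.List.pyGetD kv ((t0 % kv.length : Nat) : Int) 0 = kv.getD (t0 % kv.length) 0 :=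
      PySem.List.pyGetD_natCast kv _ 0
    have hcy : cycSum kv (t0 + 1) = cycSum kv t0 + kv.getD (t0 % kv.length) 0 := by
      rw [cycSum]
    -- the three components of the step from this state
    have hout : pyReduce (v + (PySem.List.pyGetD kv ((t0 % kv.length : Nat) : Int) 0 + cycSum kv t0 % 286)) 286
        = (v + cycSum kv (t0 + 1)) % 286 := by
      rw [hget, pyReduce_eq _ _ (by omega) (by omega), hcy]
      omega
    have hlast : pyReduce (PySem.List.pyGetD kv ((t0 % kv.length : Nat) : Int) 0 + cycSum kv t0 % 286) 286
        = cycSum kv (t0 + 1) % 286 := by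
      rw [hget, pyReduce_eq _ _ (by omega) (by omega), hcy]
      omega
    have hi : (if ((t0 % kv.length : Nat) : Int) + 1 = (kv.length : Int) then (0 : Int)
        else ((t0 % kv.length : Nat) : Int) + 1) = (((t0 + 1) % kv.length : Nat) : Int) := by
      rw [succ_mod t0 kv.length hm]
      by_cases h : t0 % kv.length + 1 = kv.length
      · rw [if_pos (by exact_mod_cast h), h]
        simp
      · rw [if_neg (by intro hc; exact h (by exact_mod_cast hc)), if_neg h]
        push_cast
        ring
    have hstep : stepA2 kv ([], ((t0 % kv.length : Nat) : Int), cycSum kv t0 % 286) v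
        = ([(v + cycSum kv (t0 + 1)) % 286], (((t0 + 1) % kv.length : Nat) : Int), cycSum kv (t0 + 1) % 286) := by
      simp only [stepA2, hout, hlast, hi, List.nil_append]
    rw [List.foldl_cons, hstep, foldlA_append kv rest, closedOut]
    rw [ih (fun x hx => hu x (by simp [hx])) (t0 + 1)]
    simp

theorem closedOut_bounds (kv : List Int) (hkv : ∀ x ∈ kv, 1 ≤ x ∧ x ≤ 286) :
    ∀ (u : List Int), (∀ v ∈ u, 0 ≤ v) → ∀ t0, ∀ e ∈ closedOut kv u t0, 0 ≤ e ∧ e < 286 := by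
  intro u
  induction u with
  | nil => intro _ t0 e he; cases he
  | cons v rest ih =>
    intro hu t0 e he
    rw [closedOut] at he
    rcases List.mem_cons.mp he with h | h
    · subst h
      have hv : 0 ≤ v := hu v (by simp)
      have hc := cycSum_nonneg kv hkv (t0 + 1)
      constructor
      · exact Int.emod_nonneg _ (by omega)
      · exact Int.emod_lt_of_pos _ (by omega)
    · exact ih (fun x hx => hu x (by simp [hx])) (t0 + 1) e h

theorem flatMap_g4 (l : List Int) (h : ∀ e ∈ l, 0 ≤ e ∧ e < 286) :
    l.flatMap g4 = l.map (fun e => charsGenA[e.toNat]!) := by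
  induction l with
  | nil => rfl
  | cons e rest ih =>
    have he := h e (by simp)
    rw [List.flatMap_cons, g4_eq e he.1 he.2, List.map_cons,
      ih (fun x hx => h x (by simp [hx]))]
    rfl

-- B's enumerate-map computes the same characters
theorem enumB_closed (kv : List Int) (hkv : ∀ x ∈ kv, 1 ≤ x ∧ x ≤ 286) (hne : kv ≠ []) :
    ∀ (u : List Int), (∀ v ∈ u, 0 ≤ v) → ∀ (t0 : Nat),
      (PySem.List.enumerate u ((t0 : Nat) : Int)).map (fun tj =>
        PySem.List.pyGetD charsGenA
          (PySem.Int.mod (tj.2 + PySem.Int.floordiv tj.1 (kv.length : Int) * kv.sum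
            + PySem.List.pyGetD (prefB kv) (PySem.Int.mod tj.1 (kv.length : Int) + 1) 0) 286) ' ')
        = (closedOut kv u t0).map (fun e => charsGenA[e.toNat]!) := by
  intro u
  induction u with
  | nil => intro _ t0; rfl
  | cons v rest ih =>
    intro hu t0
    have hm : 0 < kv.length := List.length_pos_of_ne_nil hne
    have ht : t0 % kv.length < kv.length := Nat.mod_lt t0 hm
    have hv : 0 ≤ v := hu v (by simp)
    rw [PySem.List.enumerate_cons, List.map_cons, closedOut, List.map_cons]
    -- head
    have hdiv : PySem.Int.floordiv ((t0 : Nat) : Int) (kv.length : Int) = ((t0 / kv.length : Nat) : Int) :=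
      PySem.Int.floordiv_natCast t0 kv.length
    have hmod : PySem.Int.mod ((t0 : Nat) : Int) (kv.length : Int) = ((t0 % kv.length : Nat) : Int) :=
      PySem.Int.mod_natCast t0 kv.length
    have hpref : PySem.List.pyGetD (prefB kv) (((t0 % kv.length : Nat) : Int) + 1) 0
        = (kv.take (t0 % kv.length + 1)).sum := by
      have hcast : (((t0 % kv.length : Nat) : Int) + 1) = (((t0 % kv.length + 1 : Nat)) : Int) := by
        push_cast; ring
      rw [hcast, PySem.List.pyGetD_natCast, prefB_getD kv _ (by omega)]
    have hval : v + ((t0 / kv.length : Nat) : Int) * kv.sum + (kv.take (t0 % kv.length + 1)).sum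
        = v + cycSum kv (t0 + 1) := by
      rw [cycSum_succ_closed kv hne t0]
      ring
    have hnn : 0 ≤ v + cycSum kv (t0 + 1) := by
      have := cycSum_nonneg kv hkv (t0 + 1)
      omega
    have hhead : PySem.List.pyGetD charsGenA
        (PySem.Int.mod (v + PySem.Int.floordiv ((t0 : Nat) : Int) (kv.length : Int) * kv.sum
          + PySem.List.pyGetD (prefB kv) (PySem.Int.mod ((t0 : Nat) : Int) (kv.length : Int) + 1) 0) 286) ' '
        = charsGenA[((v + cycSum kv (t0 + 1)) % 286).toNat]! := by
      rw [hdiv, hmod, hpref, hval, PySem.Int.mod_eq_emod_of_pos (by omega)]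
      have hb1 : 0 ≤ (v + cycSum kv (t0 + 1)) % 286 := Int.emod_nonneg _ (by omega)
      have hb2 : (v + cycSum kv (t0 + 1)) % 286 < 286 := Int.emod_lt_of_pos _ (by omega)
      rw [PySem.List.pyGetD_eq_getElem charsGenA ' ' hb1 (by rw [chars_len]; omega),
        getElem!_pos charsGenA _ (by rw [chars_len]; omega)]
    rw [hhead]
    congr 1
    have hcast1 : ((t0 : Nat) : Int) + 1 = (((t0 + 1 : Nat)) : Int) := by push_cast; ring
    rw [hcast1, ih (fun x hx => hu x (by simp [hx])) (t0 + 1)]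

theorem phase1_tv (x : List Char) : phase1A x (fun i => (i : Int)) = tvOf x := by
  rw [phase1_gen]; rfl

theorem tIdx_eq (x : List Char) :
    x.filterMap (fun c => (PySem.List.index? charsGenA c).map (fun (j : Nat) => (j : Int))) = tvOf x := rfl

theorem phase1_kv' (k : String) : phase1A k.toList (fun i => (286 : Int) - (i : Int)) = kvL k := by
  have h := phase1_kv k
  simpa [chars_len] using h

theorem prefB_total (kv : List Int) :
    PySem.List.pyGetD (prefB kv) ((kv.length : Nat) : Int) 0 = kv.sum := by
  rw [PySem.List.pyGetD_natCast, prefB_getD kv _ (by omega), List.take_length]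

theorem kvL_nil_not_mem (k : String) (h : kvL k = []) : ∀ c ∈ k.toList, c ∉ charsGenA := by
  intro c hc hmem
  cases hI : PySem.List.index? charsGenA c with
  | none => exact (PySem.List.index?_eq_none_iff charsGenA c).mp hI hmem
  | some j =>
    have hin : ((286 : Int) - (j : Int)) ∈ kvL k :=
      List.mem_filterMap.mpr ⟨c, hc, by rw [hI]; rfl⟩
    rw [h] at hin
    cases hin

-- ===== VERDICT (by name: the statement is the Claim_ definition above) =====
theorem text_decryption_spec : Claim_equal_text_decryption := by
  intro t k _ hPre
  unfold Spec_text_decryption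
  show text_decryption t k = text_decryption_alt t k
  simp only [text_decryption, text_decryption_alt, stepA_eq, kvB_eq, phase4_flatMap,
    phase1_tv, chars_eq, PySem.List.len_eq, chars_len, Nat.cast_ofNat, prefB_total,
    phase1_kv', tIdx_eq]
  by_cases hkv : kvL k = []
  · -- no keyword character is in the charset: by Pre_ the text has no charset character either
    have hknot := kvL_nil_not_mem k hkv
    have htnot : ∀ c ∈ t.toList, c ∉ charsGenA := by
      rw [Pre_text_decryption, Bool.or_eq_true, List.any_eq_true, List.all_eq_true] at hPre
      rcases hPre with h | h
      · obtain ⟨c, hc, hb⟩ := h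
        simp only [List.contains_eq_mem, decide_eq_true_eq] at hb
        exact absurd hb (hknot c hc)
      · intro c hc hmem
        have hb := h c hc
        simp only [List.contains_eq_mem, Bool.not_eq_true', decide_eq_false_iff_not] at hb
        exact hb hmem
    have htv0 : tvOf t.toList = [] := by
      rw [tvOf, List.filterMap_eq_nil_iff]
      intro c hc
      rw [Option.map_eq_none_iff, PySem.List.index?_eq_none_iff]
      exact htnot c hc
    rw [htv0]
    rfl
  · have hb := kv_bounds k
    have hA := foldA_closed (kvL k) hb hkv (tvOf t.toList) (tv_nonneg t.toList) 0
    simp only [Nat.zero_mod, Nat.cast_zero, cycSum, Int.zero_emod] at hA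
    have hB := enumB_closed (kvL k) hb hkv (tvOf t.toList) (tv_nonneg t.toList) 0
    simp only [Nat.cast_zero] at hB
    rw [hA, hB, flatMap_g4 _ (closedOut_bounds (kvL k) hb (tvOf t.toList) (tv_nonneg t.toList) 0)]
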